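-- pv_equiv track=rewrite | github.com/qzzzle/django12 | game/graphic/funcs.py | show_visited_cells
-- ===== SOURCE A (Python) =====
-- def show_visited_cells(visited_cells: list[tuple], dimensions: int) -> str:
--     game_map = " _ " * dimensions + "\n"
--     for col in range(dimensions):
--         for row in range(dimensions):
--             if (row + 1, col + 1) in visited_cells:
--                 game_map += "|x|"
--             else:
--                 game_map += "|_|"
--         game_map += "\n"
--     return game_map
-- ===== SOURCE B (Python) =====
-- def show_visited_cells(visited_cells: list[tuple], dimensions: int) -> str:
--     d = dimensions
--     buf = list(" _ " * d + "\n" + ("|_|" * d + "\n") * d)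
--     stride = 3 * d + 1
--     for r, c in visited_cells:
--         if 1 <= r <= d and 1 <= c <= d:
--             buf[c * stride + 3 * (r - 1) + 1] = "x"
--     return "".join(buf)
-- ===== Notes on version B (the rewrite author's own statement) =====
-- stated objective: faster
-- what changed: B builds the complete all-unvisited template string once, then patches it in place: one pass over visited_cells computes each in-range cell's flat character index (c*stride + 3*(r-1) + 1, stride = 3*d+1) and overwrites that '_' with 'x'; A instead renders cell by cell with a per-cell membership scan of visited_cells.
import Mathlib
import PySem

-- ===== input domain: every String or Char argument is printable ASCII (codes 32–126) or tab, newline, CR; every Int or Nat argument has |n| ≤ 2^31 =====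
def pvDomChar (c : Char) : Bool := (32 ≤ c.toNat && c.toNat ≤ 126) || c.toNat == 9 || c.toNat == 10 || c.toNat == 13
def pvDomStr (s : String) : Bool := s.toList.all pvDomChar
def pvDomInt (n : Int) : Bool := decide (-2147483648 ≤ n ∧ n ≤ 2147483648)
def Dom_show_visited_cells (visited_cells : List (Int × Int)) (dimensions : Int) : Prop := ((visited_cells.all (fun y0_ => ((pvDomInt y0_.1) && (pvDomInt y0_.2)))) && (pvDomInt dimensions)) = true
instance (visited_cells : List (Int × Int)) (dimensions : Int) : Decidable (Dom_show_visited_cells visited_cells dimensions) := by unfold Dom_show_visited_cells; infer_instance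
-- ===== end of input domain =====

-- B builds the full all-unvisited template string once and patches the 'x' characters in
-- place by flat-index arithmetic, instead of A's per-cell membership scan (objective: faster).

-- ===== PORT A =====
-- literal transliteration of A: string accumulator, nested for-loops over range(dimensions),
-- per-cell membership test '(row+1, col+1) in visited_cells'
def show_visited_cells (visited_cells : List (Int × Int)) (dimensions : Int) : String :=
  let init : List Char := PySem.List.pyRepeat [' ', '_', ' '] dimensions ++ ['\n']
  String.ofList <|
    (PySem.List.pyRange 0 dimensions 1).foldl (fun gm col =>
      ((PySem.List.pyRange 0 dimensions 1).foldl (fun gm row =>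
        gm ++ (if (row + 1, col + 1) ∈ visited_cells then "|x|".toList else "|_|".toList)) gm)
      ++ ['\n']) init

-- ===== PORT B =====
-- transliteration of Source B: the complete all-unvisited template as a char buffer, then one pass
-- over visited_cells overwriting buf[c*stride + 3*(r-1) + 1] with 'x' for in-range entries
def show_visited_cells_alt (visited_cells : List (Int × Int)) (dimensions : Int) : String :=
  let buf0 : List Char :=
    PySem.List.pyRepeat [' ', '_', ' '] dimensions ++ ['\n'] ++
      PySem.List.pyRepeat (PySem.List.pyRepeat ['|', '_', '|'] dimensions ++ ['\n']) dimensions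
  let stride := 3 * dimensions + 1
  let buf := visited_cells.foldl (fun b rc =>
    if 1 ≤ rc.1 ∧ rc.1 ≤ dimensions ∧ 1 ≤ rc.2 ∧ rc.2 ≤ dimensions then
      b.set (rc.2 * stride + 3 * (rc.1 - 1) + 1).toNat 'x'
    else b) buf0
  String.ofList buf

-- ===== PRECONDITION & SPEC =====
def Spec_show_visited_cells (visited_cells : List (Int × Int)) (dimensions : Int) (out : String) : Prop := out = show_visited_cells_alt visited_cells dimensions
instance (visited_cells : List (Int × Int)) (dimensions : Int) (out : String) : Decidable (Spec_show_visited_cells visited_cells dimensions out) := by unfold Spec_show_visited_cells; infer_instance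

-- ===== CLAIM (what is proved, stated in full; the proofs are below) =====
def Claim_equal_show_visited_cells : Prop := ∀ (visited_cells : List (Int × Int)) (dimensions : Int), Dom_show_visited_cells visited_cells dimensions → Spec_show_visited_cells visited_cells dimensions (show_visited_cells visited_cells dimensions)

-- ===== LEMMAS AND PROOFS =====

-- abstract rendering of the final buffer: header, then one row per column index
def pvBlock (b : Bool) : List Char := ['|', if b then 'x' else '_', '|']
def pvRow (n : Nat) (g : Nat → Bool) : List Char :=
  (List.range n).flatMap (fun ri => pvBlock (g ri)) ++ ['\n']
def pvHdr (n : Nat) : List Char := (List.replicate n [' ', '_', ' ']).flatten ++ ['\n']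
def pvRender (n : Nat) (f : Nat → Nat → Bool) : List Char :=
  pvHdr n ++ (List.range n).flatMap (fun ci => pvRow n (f ci))

theorem pvBlock_length (b : Bool) : (pvBlock b).length = 3 := by cases b <;> rfl

theorem pvFlatten_length_uniform {α : Type} (L : Nat) (rows : List (List α))
    (h : ∀ r ∈ rows, r.length = L) : rows.flatten.length = L * rows.length := by
  induction rows with
  | nil => simp
  | cons r t ih =>
    simp only [List.flatten_cons, List.length_append, h r (by simp), List.length_cons,
      ih (fun r hr => h r (by simp [hr]))]
    ring

theorem pvRow_length (n : Nat) (g : Nat → Bool) : (pvRow n g).length = 3 * n + 1 := by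
  unfold pvRow
  rw [List.length_append, List.flatMap_def,
    pvFlatten_length_uniform 3 _ (by
      intro r hr
      simp only [List.mem_map] at hr
      obtain ⟨j, _, rfl⟩ := hr
      exact pvBlock_length _)]
  simp

theorem pvHdr_length (n : Nat) : (pvHdr n).length = 3 * n + 1 := by
  unfold pvHdr
  rw [List.length_append, pvFlatten_length_uniform 3 _ (by intro r hr; simp_all)]
  simp

theorem pvRow_congr (n : Nat) (g g' : Nat → Bool) (h : ∀ j < n, g j = g' j) :
    pvRow n g = pvRow n g' := by
  unfold pvRow
  congr 1
  refine List.flatMap_congr (fun j hj => ?_)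
  rw [h j (List.mem_range.mp hj)]

theorem pvRender_congr (n : Nat) (f f' : Nat → Nat → Bool)
    (h : ∀ ci < n, ∀ ri < n, f ci ri = f' ci ri) : pvRender n f = pvRender n f' := by
  unfold pvRender
  congr 1
  refine List.flatMap_congr (fun ci hci => ?_)
  exact pvRow_congr n _ _ (fun ri hri => h ci (List.mem_range.mp hci) ri hri)

-- setting past a prefix
theorem pvSet_append_skip {α : Type} (s t : List α) (i : Nat) (x : α) :
    (s ++ t).set (s.length + i) x = s ++ t.set i x := by
  rw [List.set_append]
  simp

theorem pvSet_append_left {α : Type} (s t : List α) (i : Nat) (x : α) (h : i < s.length) :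
    (s ++ t).set i x = s.set i x ++ t := by
  rw [List.set_append]
  simp [h]

-- setting into a flatten of uniform-length rows = modifying one row
theorem pvSet_flatten_uniform {α : Type} (L : Nat) (rows : List (List α))
    (h : ∀ r ∈ rows, r.length = L) (k i : Nat) (x : α) (hk : k < rows.length) (hi : i < L) :
    rows.flatten.set (L * k + i) x = (rows.modify k (fun r => r.set i x)).flatten := by
  induction rows generalizing k with
  | nil => simp at hk
  | cons r t ih =>
    cases k with
    | zero =>
      simp only [Nat.mul_zero, Nat.zero_add, List.flatten_cons, List.modify_zero_cons]
      exact pvSet_append_left r t.flatten i x (by rw [h r (by simp)]; exact hi)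
    | succ k =>
      have hlen : r.length = L := h r (by simp)
      have harith : L * (k + 1) + i = r.length + (L * k + i) := by rw [hlen]; ring
      simp only [List.flatten_cons, List.modify_succ_cons, harith]
      rw [pvSet_append_skip, ih (fun r hr => h r (by simp [hr])) k (by simpa using hk)]

-- modify of a map over range, as a pointwise if
theorem pvModify_map_range {α : Type} (n k : Nat) (g : Nat → α) (h : α → α) :
    ((List.range n).map g).modify k h
      = (List.range n).map (fun j => if j = k then h (g j) else g j) := by
  apply List.ext_getElem
  · simp
  · intro j h₁ h₂
    have hj : j < n := by simpa using h₂
    rw [List.getElem_modify]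
    simp only [List.getElem_map, List.getElem_range]
    by_cases hjk : k = j
    · simp [hjk]
    · rw [if_neg hjk, if_neg (fun h => hjk h.symm)]

-- one 'x' patch inside a single row
theorem pvRow_set (n : Nat) (g : Nat → Bool) (ri : Nat) (hri : ri < n) :
    (pvRow n g).set (3 * ri + 1) 'x' = pvRow n (fun j => if j = ri then true else g j) := by
  unfold pvRow
  rw [List.flatMap_def, List.flatMap_def]
  have hlen : ∀ r ∈ (List.range n).map (fun j => pvBlock (g j)), r.length = 3 := by
    intro r hr
    simp only [List.mem_map] at hr
    obtain ⟨j, _, rfl⟩ := hr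
    exact pvBlock_length _
  rw [pvSet_append_left _ _ _ _ (by
      rw [pvFlatten_length_uniform 3 _ hlen]
      simp only [List.length_map, List.length_range]
      omega),
    pvSet_flatten_uniform 3 _ hlen ri 1 'x' (by simpa using hri) (by omega),
    pvModify_map_range]
  congr 1
  congr 1
  refine List.map_congr_left (fun j _ => ?_)
  by_cases hj : j = ri
  · subst hj; cases g j <;> simp [pvBlock, List.set]
  · simp [hj]

-- the initial template is the all-false rendering
theorem pvBuf0_eq (d : Int) :
    PySem.List.pyRepeat [' ', '_', ' '] d ++ ['\n'] ++
      PySem.List.pyRepeat (PySem.List.pyRepeat ['|', '_', '|'] d ++ ['\n']) d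
    = pvRender d.toNat (fun _ _ => false) := by
  unfold pvRender pvHdr pvRow pvBlock PySem.List.pyRepeat
  congr 1
  simp only [List.flatMap_def, Bool.false_eq_true, if_false, List.map_const', List.length_range]

-- one update step of B's patching pass, on the abstract rendering
theorem pvStep (d : Int) (x : Int × Int) (f : Nat → Nat → Bool) :
    (if 1 ≤ x.1 ∧ x.1 ≤ d ∧ 1 ≤ x.2 ∧ x.2 ≤ d then
        (pvRender d.toNat f).set (x.2 * (3 * d + 1) + 3 * (x.1 - 1) + 1).toNat 'x'
      else pvRender d.toNat f)
    = pvRender d.toNat (fun ci ri => f ci ri || decide (((ri : Int) + 1, (ci : Int) + 1) = x)) := by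
  split_ifs with hin
  · obtain ⟨h1, h2, h3, h4⟩ := hin
    set n := d.toNat with hn
    have hdn : (n : Int) = d := Int.toNat_of_nonneg (by omega)
    set ci := (x.2 - 1).toNat with hcidef
    set ri := (x.1 - 1).toNat with hridef
    have hci' : (ci : Int) = x.2 - 1 := Int.toNat_of_nonneg (by omega)
    have hri' : (ri : Int) = x.1 - 1 := Int.toNat_of_nonneg (by omega)
    have hci : ci < n := by omega
    have hri : ri < n := by omega
    have hidx : (x.2 * (3 * d + 1) + 3 * (x.1 - 1) + 1).toNat
        = (3 * n + 1) + ((3 * n + 1) * ci + (3 * ri + 1)) := by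
      have : x.2 * (3 * d + 1) + 3 * (x.1 - 1) + 1
          = (((3 * n + 1) + ((3 * n + 1) * ci + (3 * ri + 1)) : Nat) : Int) := by
        push_cast
        rw [hdn, hci', hri']
        ring
      rw [this, Int.toNat_natCast]
    rw [hidx]
    unfold pvRender
    have hskip := pvSet_append_skip (pvHdr n)
      ((List.map (fun ci => pvRow n (f ci)) (List.range n)).flatten)
      ((3 * n + 1) * ci + (3 * ri + 1)) 'x'
    rw [pvHdr_length] at hskip
    rw [List.flatMap_def, hskip,
      pvSet_flatten_uniform (3 * n + 1) _ (by
        intro r hr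
        simp only [List.mem_map] at hr
        obtain ⟨j, _, rfl⟩ := hr
        exact pvRow_length n _) ci (3 * ri + 1) 'x' (by simpa using hci) (by omega),
      pvModify_map_range]
    rw [List.flatMap_def]
    congr 2
    refine List.map_congr_left (fun j _ => ?_)
    by_cases hj : j = ci
    · rw [if_pos hj, pvRow_set n _ ri hri]
      refine pvRow_congr n _ _ (fun j' _ => ?_)
      by_cases hj' : j' = ri
      · have hx : (((ri : Int) + 1, (j : Int) + 1) = x) := by
          cases x
          simp only [Prod.mk.injEq]
          constructor <;> omega
        simp [hj', hx]
      · have hx : ¬ (((j' : Int) + 1, (j : Int) + 1) = x) := by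
          intro he
          have hx1 : x.1 = (j' : Int) + 1 := by rw [← he]
          exact hj' (by omega)
        simp [hj', hx]
    · rw [if_neg hj]
      refine pvRow_congr n _ _ (fun j' _ => ?_)
      have hx : ¬ (((j' : Int) + 1, (j : Int) + 1) = x) := by
        intro he
        have hx2 : x.2 = (j : Int) + 1 := by rw [← he]
        exact hj (by omega)
      simp [hx]
  · apply pvRender_congr
    intro ci hci ri hri
    have hx : ¬ (((ri : Int) + 1, (ci : Int) + 1) = x) := by
      intro he
      have e1 : x.1 = (ri : Int) + 1 := by rw [← he]
      have e2 : x.2 = (ci : Int) + 1 := by rw [← he]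
      exact hin ⟨by omega, by omega, by omega, by omega⟩
    simp [hx]

-- the whole patching pass over visited_cells
theorem pvMarkBuf (d : Int) (vc : List (Int × Int)) (f : Nat → Nat → Bool) :
    vc.foldl (fun b rc =>
      if 1 ≤ rc.1 ∧ rc.1 ≤ d ∧ 1 ≤ rc.2 ∧ rc.2 ≤ d then
        b.set (rc.2 * (3 * d + 1) + 3 * (rc.1 - 1) + 1).toNat 'x'
      else b) (pvRender d.toNat f)
    = pvRender d.toNat (fun ci ri => f ci ri || decide (((ri : Int) + 1, (ci : Int) + 1) ∈ vc)) := by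
  induction vc generalizing f with
  | nil => simp [List.foldl]
  | cons x vc ih =>
    simp only [List.foldl_cons]
    rw [pvStep d x f, ih]
    apply pvRender_congr
    intro ci _ ri _
    by_cases hx : ((ri : Int) + 1, (ci : Int) + 1) = x <;>
      by_cases hm : ((ri : Int) + 1, (ci : Int) + 1) ∈ vc <;>
      simp [hx, hm]

-- a fold over range(d) of ints is a fold over List.range d.toNat
theorem pvFoldlRange {a : Type} (d : Int) (F : a → Int → a) (init : a) :
    (PySem.List.pyRange 0 d 1).foldl F init
    = (List.range d.toNat).foldl (fun acc (k : Nat) => F acc (k : Int)) init := by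
  rw [PySem.List.pyRange_one, List.foldl_map]
  simp only [sub_zero, zero_add]

-- A's inner row loop, flattened
theorem pvRowA (vc : List (Int × Int)) (d : Int) (c : Int) (gm : List Char) :
    (PySem.List.pyRange 0 d 1).foldl (fun gm row =>
        gm ++ (if (row + 1, c + 1) ∈ vc then "|x|".toList else "|_|".toList)) gm
    = gm ++ (List.range d.toNat).flatMap
        (fun (ri : Nat) => if ((ri : Int) + 1, c + 1) ∈ vc then "|x|".toList else "|_|".toList) := by
  rw [pvFoldlRange, PySem.List.foldl_append_eq_flatMap]

-- a fold that appends h x at each step is init ++ flatMap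
theorem pvFoldl_flat {a : Type} (F : List Char → a → List Char) (h : a → List Char)
    (hF : ∀ g x, F g x = g ++ h x) :
    ∀ (l : List a) (init : List Char), l.foldl F init = init ++ l.flatMap h := by
  intro l
  induction l with
  | nil => simp
  | cons x t ih =>
    intro init
    simp only [List.foldl_cons, List.flatMap_cons, hF]
    rw [ih]
    simp

-- ===== VERDICT (by name: the statement is the Claim_ definition above) =====
theorem show_visited_cells_spec : Claim_equal_show_visited_cells := by
  intro vc d _
  unfold Spec_show_visited_cells show_visited_cells show_visited_cells_alt
  simp only []
  rw [pvBuf0_eq d, pvMarkBuf d vc]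
  congr 1
  rw [pvFoldlRange]
  rw [pvFoldl_flat _
        (fun k : Nat => (List.range d.toNat).flatMap
          (fun (ri : Nat) => if ((ri : Int) + 1, (k : Int) + 1) ∈ vc then "|x|".toList else "|_|".toList)
          ++ ['\n'])
        (by
          intro g k
          rw [pvRowA vc d (k : Int) g, List.append_assoc])]
  unfold pvRender pvHdr pvRow
  congr 1
  refine List.flatMap_congr (fun k _ => ?_)
  congr 1
  refine List.flatMap_congr (fun j _ => ?_)
  by_cases hm : (((j : Int)) + 1, ((k : Int)) + 1) ∈ vc <;> simp [hm, pvBlock]
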